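-- pv_equiv track=rewrite | github.com/someoneatemylastsliceofpizza/R5-AnimConv | scripts/reorder.py | reorder_and_rewrite_skeleton
-- ===== SOURCE A (Python) =====
-- def reorder_and_rewrite_skeleton(lines, id_map):
--     output = []
--     time_block = []
--     in_time = False
--
--     for line in lines:
--         stripped = line.strip()
--         if stripped.startswith('time '):
--             if time_block:
--                 reordered = sorted(time_block, key=lambda l: id_map.get(int(l.split()[0]), 9999))
--                 output.extend(rewrite_bone_ids(reordered, id_map))
--                 time_block = []
--             output.append(line)
--             in_time = True
--         elif in_time and stripped:
--             time_block.append(line)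
--         else:
--             if time_block:
--                 reordered = sorted(time_block, key=lambda l: id_map.get(int(l.split()[0]), 9999))
--                 output.extend(rewrite_bone_ids(reordered, id_map))
--                 time_block = []
--             output.append(line)
--             in_time = False
--
--     if time_block:
--         reordered = sorted(time_block, key=lambda l: id_map.get(int(l.split()[0]), 9999))
--         output.extend(rewrite_bone_ids(reordered, id_map))
--
--     return output
--
-- def rewrite_bone_ids(lines, id_map):
--     rewritten = []
--     for line in lines:
--         parts = line.strip().split()
--         if not parts:
--             continue
--         old_id = int(parts[0])
--         new_id = id_map.get(old_id, old_id)
--         rewritten.append(' '.join([str(new_id)] + parts[1:]) + '\n')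
--     return rewritten
-- ===== SOURCE B (Python) =====
-- def reorder_and_rewrite_skeleton(lines, id_map):
--     # pass 1: segmentation (parse): a segment is a passthrough line (str) or a block (list)
--     segments = []
--     in_time = False
--     for line in lines:
--         stripped = line.strip()
--         if stripped.startswith('time '):
--             segments.append(line)
--             in_time = True
--         elif in_time and stripped:
--             if segments and isinstance(segments[-1], list):
--                 segments[-1].append(line)
--             else:
--                 segments.append([line])
--         else:
--             segments.append(line)
--             in_time = False
--     # pass 2: emission (transform)
--     out = []
--     for seg in segments:
--         out.extend(emit_segment(seg, id_map))
--     return out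
--
-- def emit_segment(seg, id_map):
--     if isinstance(seg, list):
--         return rewrite_bone_ids(
--             sorted(seg, key=lambda l: id_map.get(int(l.split()[0]), 9999)), id_map)
--     return [seg]
--
-- def rewrite_bone_ids(lines, id_map):
--     rewritten = []
--     for line in lines:
--         parts = line.strip().split()
--         if not parts:
--             continue
--         old_id = int(parts[0])
--         new_id = id_map.get(old_id, old_id)
--         rewritten.append(' '.join([str(new_id)] + parts[1:]) + '\n')
--     return rewritten
-- ===== Notes on version B (the rewrite author's own statement) =====
-- stated objective: alternative
-- what changed: Replaced A's single interleaved loop with inline flush-on-boundary logic by a two-phase parse-then-transform pipeline: pass 1 segments the lines into passthrough lines and bone-id blocks, pass 2 emits each segment (sorting and rewriting blocks) in order.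
import Mathlib
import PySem

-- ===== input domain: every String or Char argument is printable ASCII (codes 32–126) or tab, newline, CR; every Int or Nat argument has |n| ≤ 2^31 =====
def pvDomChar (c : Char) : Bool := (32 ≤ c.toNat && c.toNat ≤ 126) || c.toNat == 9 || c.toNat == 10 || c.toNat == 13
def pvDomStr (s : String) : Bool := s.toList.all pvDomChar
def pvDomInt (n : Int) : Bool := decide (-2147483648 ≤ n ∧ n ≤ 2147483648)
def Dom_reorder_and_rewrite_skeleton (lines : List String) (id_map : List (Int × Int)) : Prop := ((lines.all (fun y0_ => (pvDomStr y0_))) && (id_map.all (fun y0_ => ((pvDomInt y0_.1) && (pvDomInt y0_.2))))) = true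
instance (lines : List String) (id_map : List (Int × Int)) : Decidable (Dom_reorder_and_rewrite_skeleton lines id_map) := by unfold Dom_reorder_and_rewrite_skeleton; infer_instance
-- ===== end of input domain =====

-- B replaces A's single interleaved loop (inline flush-on-boundary) by a two-phase
-- parse-then-transform pipeline (segment the lines, then emit each segment); objective: alternative.

-- ===== PORT A =====
-- id_map.get(k, d)  (id_map is a Python dict, modelled as an assoc list in insertion order)
def pvGet (id_map : List (Int × Int)) (k d : Int) : Int :=
  (PySem.Dict.ofList id_map).getD k d

-- the sort key  lambda l: id_map.get(int(l.split()[0]), 9999)  (total form; Pre_ guarantees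
-- that on admitted inputs every line it is applied to has an int first token)
def pvKey (id_map : List (Int × Int)) (l : String) : Int :=
  pvGet id_map ((PySem.Int.ofStr? ((PySem.Str.split₀ l).getD 0 "")).getD 0) 9999

-- helper rewrite_bone_ids from the same module (used verbatim by both A and B)
def rewrite_bone_ids (ls : List String) (id_map : List (Int × Int)) : List String :=
  ls.foldl (fun acc line =>
    match PySem.Str.split₀ (PySem.Str.strip line) with
    | [] => acc
    | p0 :: rest =>
      let old_id := (PySem.Int.ofStr? p0).getD 0
      let new_id := pvGet id_map old_id old_id
      acc ++ [PySem.Str.join " " (PySem.Int.toStr new_id :: rest) ++ "\n"]) []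

-- the flush A performs at each block boundary (A's Python repeats this expression three times)
def flush_block (tb : List String) (id_map : List (Int × Int)) : List String :=
  rewrite_bone_ids (PySem.List.sorted tb (pvKey id_map) false) id_map

-- A's loop body; state = (output, time_block, in_time)
def stepA (id_map : List (Int × Int)) (s : List String × List String × Bool) (line : String) :
    List String × List String × Bool :=
  let stripped := PySem.Str.strip line
  if PySem.Str.startswith stripped "time " then
    ((if s.2.1.isEmpty then s.1 else s.1 ++ flush_block s.2.1 id_map) ++ [line], [], true)
  else if s.2.2 && !(stripped == "") then
    (s.1, s.2.1 ++ [line], s.2.2)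
  else
    ((if s.2.1.isEmpty then s.1 else s.1 ++ flush_block s.2.1 id_map) ++ [line], [], false)

def reorder_and_rewrite_skeleton (lines : List String) (id_map : List (Int × Int)) : List String :=
  let st := lines.foldl (stepA id_map) ([], [], false)
  if st.2.1.isEmpty then st.1 else st.1 ++ flush_block st.2.1 id_map

-- ===== PORT B =====
-- a segment: a passthrough line, or a block of bone-id lines
inductive Seg where
  | line : String → Seg
  | block : List String → Seg
deriving DecidableEq, Repr

-- Source B: append line to the trailing block segment if there is one, else start a new block
def pushBlock : List Seg → String → List Seg
  | [], l => [Seg.block [l]]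
  | [Seg.block b], l => [Seg.block (b ++ [l])]
  | [Seg.line s], l => [Seg.line s, Seg.block [l]]
  | s :: t :: rest, l => s :: pushBlock (t :: rest) l

-- pass 1 loop body; state = (segments, in_time)
def stepB (s : List Seg × Bool) (line : String) : List Seg × Bool :=
  let stripped := PySem.Str.strip line
  if PySem.Str.startswith stripped "time " then (s.1 ++ [Seg.line line], true)
  else if s.2 && !(stripped == "") then (pushBlock s.1 line, s.2)
  else (s.1 ++ [Seg.line line], false)

def segmentize (lines : List String) : List Seg :=
  (lines.foldl stepB ([], false)).1

-- emit_segment from Source B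
def segOut (id_map : List (Int × Int)) : Seg → List String
  | Seg.line l => [l]
  | Seg.block b => rewrite_bone_ids (PySem.List.sorted b (pvKey id_map) false) id_map

def reorder_and_rewrite_skeleton_alt (lines : List String) (id_map : List (Int × Int)) : List String :=
  (segmentize lines).foldl (fun out seg => out ++ segOut id_map seg) []

-- ===== PRECONDITION & SPEC =====
-- Pre_ excludes exactly the inputs on which Python A raises ValueError: a line inside a time
-- block (non-blank, not a 'time ' header, preceded by a header with no blank line in between)
-- whose first whitespace token is not a valid Python int literal.
def Pre_reorder_and_rewrite_skeleton (lines : List String) (id_map : List (Int × Int)) : Prop :=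
  ∀ i : Fin lines.length,
    (PySem.Str.strip lines[i] ≠ "" ∧
     ¬ PySem.Str.startswith (PySem.Str.strip lines[i]) "time " = true ∧
     ∃ j : Fin lines.length, j < i ∧
       PySem.Str.startswith (PySem.Str.strip lines[j]) "time " = true ∧
       ∀ k : Fin lines.length, j < k → k < i → PySem.Str.strip lines[k] ≠ "") →
    (PySem.Int.ofStr? ((PySem.Str.split₀ lines[i]).getD 0 "")).isSome = true
instance (lines : List String) (id_map : List (Int × Int)) : Decidable (Pre_reorder_and_rewrite_skeleton lines id_map) := by unfold Pre_reorder_and_rewrite_skeleton; infer_instance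

def pvWitness_reorder_and_rewrite_skeleton : List String × (List (Int × Int)) :=
  (["time 0", "2 a", "1 b", "", "x"], [((1 : Int), (0 : Int)), (2, 1)])

def Spec_reorder_and_rewrite_skeleton (lines : List String) (id_map : List (Int × Int)) (out : List String) : Prop := out = reorder_and_rewrite_skeleton_alt lines id_map
instance (lines : List String) (id_map : List (Int × Int)) (out : List String) : Decidable (Spec_reorder_and_rewrite_skeleton lines id_map out) := by unfold Spec_reorder_and_rewrite_skeleton; infer_instance

-- ===== CLAIM (what is proved, stated in full; the proofs are below) =====
def Claim_equal_reorder_and_rewrite_skeleton : Prop := ∀ (lines : List String) (id_map : List (Int × Int)), Dom_reorder_and_rewrite_skeleton lines id_map → Pre_reorder_and_rewrite_skeleton lines id_map → Spec_reorder_and_rewrite_skeleton lines id_map (reorder_and_rewrite_skeleton lines id_map)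

-- ===== LEMMAS AND PROOFS =====
-- a segment list not ending in a block (so the next block line starts a new block)
def NoTrailBlock (segs : List Seg) : Prop := segs = [] ∨ ∃ s₀ x, segs = s₀ ++ [Seg.line x]

theorem pushBlock_append_block (s₀ : List Seg) (b : List String) (l : String) :
    pushBlock (s₀ ++ [Seg.block b]) l = s₀ ++ [Seg.block (b ++ [l])] := by
  induction s₀ with
  | nil => rfl
  | cons x xs ih =>
    cases xs with
    | nil => cases x <;> rfl
    | cons y ys => simpa [pushBlock] using ih

theorem pushBlock_append_line (s₀ : List Seg) (x l : String) :
    pushBlock (s₀ ++ [Seg.line x]) l = s₀ ++ [Seg.line x, Seg.block [l]] := by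
  induction s₀ with
  | nil => rfl
  | cons z zs ih =>
    cases zs with
    | nil => cases z <;> rfl
    | cons y ys => simpa [pushBlock] using ih

theorem pushBlock_noTrail (segs : List Seg) (h : NoTrailBlock segs) (l : String) :
    pushBlock segs l = segs ++ [Seg.block [l]] := by
  rcases h with rfl | ⟨s₀, x, rfl⟩
  · rfl
  · simpa using pushBlock_append_line s₀ x l

-- relation between A's loop state (output, time_block) and B's segment list
def StRel (id_map : List (Int × Int)) (output tb : List String) (segs : List Seg) : Prop :=
  (tb = [] ∧ output = segs.flatMap (segOut id_map) ∧ NoTrailBlock segs) ∨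
  (tb ≠ [] ∧ ∃ s₀, segs = s₀ ++ [Seg.block tb] ∧ output = s₀.flatMap (segOut id_map))

-- A's finalisation step (the flush after the loop), as a function of A's final state
def finA (id_map : List (Int × Int)) (st : List String × List String × Bool) : List String :=
  if st.2.1.isEmpty then st.1 else st.1 ++ flush_block st.2.1 id_map

theorem main_invariant (id_map : List (Int × Int)) (lines : List String) :
    ∀ (output tb : List String) (flag : Bool) (segs : List Seg),
      StRel id_map output tb segs →
      finA id_map (lines.foldl (stepA id_map) (output, tb, flag))
      = ((lines.foldl stepB (segs, flag)).1).flatMap (segOut id_map) := by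
  induction lines with
  | nil =>
    intro output tb flag segs hrel
    rcases hrel with ⟨rfl, rfl, _⟩ | ⟨hne, s₀, rfl, rfl⟩
    · simp [finA]
    · simp [finA, List.isEmpty_iff, hne, flush_block, segOut]
  | cons l ls ih =>
    intro output tb flag segs hrel
    simp only [List.foldl_cons]
    by_cases h1 : PySem.Str.startswith (PySem.Str.strip l) "time " = true
    · have ha : stepA id_map (output, tb, flag) l
          = ((if tb.isEmpty then output else output ++ flush_block tb id_map) ++ [l], [], true) := by
        simp only [stepA]; rw [if_pos h1]
      have hb : stepB (segs, flag) l = (segs ++ [Seg.line l], true) := by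
        simp only [stepB]; rw [if_pos h1]
      rw [ha, hb]
      apply ih
      rcases hrel with ⟨rfl, rfl, _⟩ | ⟨hne, s₀, rfl, rfl⟩
      · exact Or.inl ⟨rfl, by simp [segOut], Or.inr ⟨_, _, rfl⟩⟩
      · refine Or.inl ⟨rfl, ?_, Or.inr ⟨_, _, rfl⟩⟩
        simp [List.isEmpty_iff, hne, flush_block, segOut]
    · by_cases h2 : (flag && !(PySem.Str.strip l == "")) = true
      · have ha : stepA id_map (output, tb, flag) l = (output, tb ++ [l], flag) := by
          simp only [stepA]; rw [if_neg h1, if_pos h2]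
        have hb : stepB (segs, flag) l = (pushBlock segs l, flag) := by
          simp only [stepB]; rw [if_neg h1, if_pos h2]
        rw [ha, hb]
        apply ih
        rcases hrel with ⟨rfl, rfl, hnt⟩ | ⟨hne, s₀, rfl, rfl⟩
        · exact Or.inr ⟨by simp, segs, by simp [pushBlock_noTrail segs hnt l], rfl⟩
        · exact Or.inr ⟨by simp, s₀, by simp [pushBlock_append_block], rfl⟩
      · have ha : stepA id_map (output, tb, flag) l
            = ((if tb.isEmpty then output else output ++ flush_block tb id_map) ++ [l], [], false) := by
          simp only [stepA]; rw [if_neg h1, if_neg h2]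
        have hb : stepB (segs, flag) l = (segs ++ [Seg.line l], false) := by
          simp only [stepB]; rw [if_neg h1, if_neg h2]
        rw [ha, hb]
        apply ih
        rcases hrel with ⟨rfl, rfl, _⟩ | ⟨hne, s₀, rfl, rfl⟩
        · exact Or.inl ⟨rfl, by simp [segOut], Or.inr ⟨_, _, rfl⟩⟩
        · refine Or.inl ⟨rfl, ?_, Or.inr ⟨_, _, rfl⟩⟩
          simp [List.isEmpty_iff, hne, flush_block, segOut]

-- ===== VERDICT (by name: the statement is the Claim_ definition above) =====
theorem reorder_and_rewrite_skeleton_spec : Claim_equal_reorder_and_rewrite_skeleton := by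
  unfold Claim_equal_reorder_and_rewrite_skeleton
  intro lines id_map _ _
  unfold Spec_reorder_and_rewrite_skeleton
  unfold reorder_and_rewrite_skeleton reorder_and_rewrite_skeleton_alt segmentize
  rw [PySem.List.foldl_append_eq_flatMap]
  have h := main_invariant id_map lines [] [] false [] (Or.inl ⟨rfl, rfl, Or.inl rfl⟩)
  simpa [finA] using h
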